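-- pv_equiv track=rewrite | github.com/PPinto22/advent-of-code-2025 | day06/part2.py | solve
-- ===== SOURCE A (Python) =====
-- def solve(lines):
--     worksheet = parse_worksheet(lines)
--     result = 0
--
--     for [numbers, operation] in worksheet:
--         if operation == '+':
--             result += sum(numbers)
--         else:
--             assert operation == '*'
--             sub_result = 1
--             for number in numbers:
--                 sub_result *= number
--             result += sub_result
--
--     return result
--
-- def parse_worksheet(lines):
--     m = len(lines[0])
--
--     columns = []
--     column_start = 0
--     j = 0
--
--     while j < m:
--         column = []
--         for line in lines[:-1]:
--             while j < m and line[j] != ' ':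
--                 j += 1
--
--         for line in lines[:-1]:
--             column.append(line[column_start:j])
--
--         j += 1
--         column_start = j
--         columns.append(column)
--
--     operations = lines[-1].split()
--     worksheet = []
--
--     for j, column in enumerate(columns):
--         sub_problem = []
--         for k in range(len(column[0])):
--             sub_problem.append(int(''.join(number[k] for number in column if number[k] != ' ')))
--         worksheet.append([sub_problem, operations[j]])
--
--     return worksheet
-- ===== SOURCE B (Python) =====
-- def solve(lines):
--     data = lines[:-1]
--     ops = lines[-1].split()
--     total, cur_sum, cur_prod = 0, 0, 1
--     pending, oi = False, 0
--     for c in range(len(lines[0])):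
--         chars = ''.join(row[c] for row in data if row[c] != ' ')
--         if not chars:
--             total += cur_sum if ops[oi] == '+' else cur_prod
--             cur_sum, cur_prod, pending, oi = 0, 1, False, oi + 1
--         else:
--             n = int(chars)
--             cur_sum += n
--             cur_prod *= n
--             pending = True
--     if pending:
--         total += cur_sum if ops[oi] == '+' else cur_prod
--     return total
-- ===== Notes on version B (the rewrite author's own statement) =====
-- stated objective: simpler
-- what changed: A parses the whole worksheet first (a shared-index row-by-row scan finds column boundaries, rows are sliced into blocks, digits re-read by position) and only then evaluates; B never materializes columns, blocks or boundaries: it makes one streaming left-to-right pass over column indices, keeping a running sum and running product, and closes a block (consuming the next operator token and adding sum or product to the total) whenever it meets an all-space column or the right edge.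
-- outside the precondition, e.g. on solve([' 3', '5 ', '* *']): A returns 5, B returns 15; on solve(['+2', '39', '+ * +']): A returns 32, B returns 32
import Mathlib
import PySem

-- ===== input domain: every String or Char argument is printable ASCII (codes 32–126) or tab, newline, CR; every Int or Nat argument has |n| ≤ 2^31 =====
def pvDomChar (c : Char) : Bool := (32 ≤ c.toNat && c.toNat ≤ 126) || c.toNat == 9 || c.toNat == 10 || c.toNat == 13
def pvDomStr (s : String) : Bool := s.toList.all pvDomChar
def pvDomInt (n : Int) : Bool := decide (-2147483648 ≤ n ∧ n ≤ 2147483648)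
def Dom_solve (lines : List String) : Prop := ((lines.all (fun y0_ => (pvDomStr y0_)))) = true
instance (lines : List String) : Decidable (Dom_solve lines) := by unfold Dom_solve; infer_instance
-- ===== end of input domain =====

-- B replaces A's two-phase parse-then-evaluate (shared-index boundary scan, row slices,
-- per-position re-reads) by a single streaming pass over column indices with running
-- sum/product accumulators; objective: simpler.

-- ===== PORT A =====
-- inner 'while j < m and line[j] != ' ': j += 1'
def scanA (row : List Char) (m : Nat) (j : Nat) : Nat :=
  if h : j < m ∧ row.getD j ' ' ≠ ' ' then scanA row m (j + 1) else j
termination_by m - j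
decreasing_by omega

theorem scanA_ge (row : List Char) (m j : Nat) : j ≤ scanA row m j := by
  unfold scanA
  split
  · exact le_trans (by omega) (scanA_ge row m (j + 1))
  · exact le_refl j
termination_by m - j
decreasing_by omega

theorem foldl_scanA_ge (g : List (List Char)) (m : Nat) (j : Nat) :
    j ≤ g.foldl (fun acc row => scanA row m acc) j := by
  induction g generalizing j with
  | nil => exact le_refl j
  | cons r rest ih => exact le_trans (scanA_ge r m j) (ih _)

def scanRowsA (g : List (List Char)) (m : Nat) (j : Nat) : Nat :=
  g.foldl (fun acc row => scanA row m acc) j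

theorem scanRowsA_ge (g : List (List Char)) (m j : Nat) : j ≤ scanRowsA g m j :=
  foldl_scanA_ge g m j

-- outer 'while j < m' loop of parse_worksheet: returns the list of columns
-- (each column = the rows' slices line[column_start:j])
def loopA (g : List (List Char)) (m : Nat) (j : Nat) : List (List (List Char)) :=
  if h : j < m then
    (g.map (fun row => (row.drop j).take (scanRowsA g m j - j))) :: loopA g m (scanRowsA g m j + 1)
  else []
termination_by m - j
decreasing_by
  have := scanRowsA_ge g m j
  omega

-- int(''.join(number[k] for number in column if number[k] != ' '))
def numA (col : List (List Char)) (k : Nat) : Int :=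
  (PySem.Int.ofChars? ((col.filter (fun nb => nb.getD k ' ' ≠ ' ')).map
      (fun nb => nb.getD k ' '))).getD 0

def solve (lines : List String) : Int :=
  let g := (lines.map String.toList).dropLast           -- lines[:-1]
  let m := ((lines.map String.toList).headD []).length  -- len(lines[0])
  let columns := loopA g m 0
  let operations := PySem.Chars.split₀ ((lines.map String.toList).getLastD [])  -- lines[-1].split()
  let worksheet := (PySem.List.enumerate columns 0).map (fun p =>
      ((List.range (p.2.headD []).length).map (fun k => numA p.2 k),
       PySem.List.pyGetD operations p.1 []))
  worksheet.foldl (fun res pr =>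
      if pr.2 = ['+'] then res + pr.1.sum
      else res + pr.1.foldl (· * ·) 1) 0

-- ===== PORT B =====
-- one iteration of B's 'for c in range(len(lines[0]))' loop;
-- state = (total, cur_sum, cur_prod, pending, oi)
def stepB (g : List (List Char)) (ops : List (List Char))
    (st : Int × Int × Int × Bool × Nat) (c : Nat) : Int × Int × Int × Bool × Nat :=
  let chars := (g.filter (fun row => row.getD c ' ' ≠ ' ')).map (fun row => row.getD c ' ')
  if chars = [] then
    (st.1 + (if PySem.List.pyGetD ops ((st.2.2.2.2 : Nat) : Int) [] = ['+'] then st.2.1 else st.2.2.1),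
     0, 1, false, st.2.2.2.2 + 1)
  else
    let n := (PySem.Int.ofChars? chars).getD 0
    (st.1, st.2.1 + n, st.2.2.1 * n, true, st.2.2.2.2)

-- 'if pending: total += cur_sum if ops[oi] == '+' else cur_prod'
def flushB (ops : List (List Char)) (st : Int × Int × Int × Bool × Nat) : Int :=
  if st.2.2.2.1 then
    st.1 + (if PySem.List.pyGetD ops ((st.2.2.2.2 : Nat) : Int) [] = ['+'] then st.2.1 else st.2.2.1)
  else st.1

def solve_alt (lines : List String) : Int :=
  let g := (lines.map String.toList).dropLast
  let ops := PySem.Chars.split₀ ((lines.map String.toList).getLastD [])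
  let m := ((lines.map String.toList).headD []).length
  flushB ops ((List.range m).foldl (stepB g ops) (0, 0, 1, false, 0))

-- ===== PRECONDITION & SPEC =====
-- Pre_ admits the empty-width worksheet (first line empty: no columns, A returns 0) and
-- otherwise restricts to well-formed worksheets: at least two lines, rectangular data rows of
-- digits and spaces, numbers right-aligned in their blocks (a nonspace-to-space step within
-- a row only at a full-height space column), and a '+'/'*' token for each of the columns;
-- outside this A's column boundaries are accidents of its shared-index scan (or A raises on
-- ragged rows / missing tokens / non-digit characters failing int()), so they are excluded.
def Pre_solve (lines : List String) : Prop :=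
  1 ≤ lines.length ∧
  ((((lines.map String.toList).headD []).length = 0) ∨
   (2 ≤ lines.length ∧
    ((lines.map String.toList).dropLast).all
        (fun row => row.length == ((lines.map String.toList).headD []).length) = true ∧
    ((lines.map String.toList).dropLast).all
        (fun row => row.all (fun ch => ch == ' ' || ch.isDigit)) = true ∧
    ((lines.map String.toList).dropLast).all
        (fun row => (List.range ((lines.map String.toList).headD []).length).all
          (fun c => c == 0 ||
            !(row.getD (c - 1) ' ' != ' ' && row.getD c ' ' == ' ') ||
            ((lines.map String.toList).dropLast).all (fun r => r.getD c ' ' == ' '))) = true ∧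
    ((List.range (((lines.map String.toList).headD []).length)).countP
          (fun c => ((lines.map String.toList).dropLast).all (fun r => r.getD c ' ' == ' ')) +
         (if 0 < ((lines.map String.toList).headD []).length ∧
             ¬ ((lines.map String.toList).dropLast).all
                 (fun r => r.getD (((lines.map String.toList).headD []).length - 1) ' ' == ' ') = true
          then 1 else 0))
        ≤ (PySem.Chars.split₀ ((lines.map String.toList).getLastD [])).length ∧
    ((PySem.Chars.split₀ ((lines.map String.toList).getLastD [])).take
          ((List.range (((lines.map String.toList).headD []).length)).countP
          (fun c => ((lines.map String.toList).dropLast).all (fun r => r.getD c ' ' == ' ')) +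
         (if 0 < ((lines.map String.toList).headD []).length ∧
             ¬ ((lines.map String.toList).dropLast).all
                 (fun r => r.getD (((lines.map String.toList).headD []).length - 1) ' ' == ' ') = true
          then 1 else 0))).all
        (fun tk => tk == ['+'] || tk == ['*']) = true))

instance (lines : List String) : Decidable (Pre_solve lines) := by
  unfold Pre_solve; infer_instance

def pvWitness_solve : List String := ["1 2", "+ *"]

def Spec_solve (lines : List String) (out : Int) : Prop := out = solve_alt lines
instance (lines : List String) (out : Int) : Decidable (Spec_solve lines out) := by unfold Spec_solve; infer_instance

-- ===== CLAIM (what is proved, stated in full; the proofs are below) =====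
def Claim_equal_solve : Prop :=
  ∀ (lines : List String), Dom_solve lines → Pre_solve lines → Spec_solve lines (solve lines)

-- ===== LEMMAS AND PROOFS =====

-- proof-side notions: all-space column, and Pre_'s column count under a name
def sepB (g : List (List Char)) (c : Nat) : Bool := g.all (fun row => row.getD c ' ' == ' ')

def PreSep (g : List (List Char)) (c : Nat) : Prop := ∀ row ∈ g, row.getD c ' ' = ' '

-- B's boundary structure, used only by the proof to mediate between A and the stream
def scanColB (g : List (List Char)) (m : Nat) (e : Nat) : Nat :=
  if h : e < m ∧ ¬ sepB g e then scanColB g m (e + 1) else e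
termination_by m - e
decreasing_by omega

theorem scanColB_ge (g : List (List Char)) (m e : Nat) : e ≤ scanColB g m e := by
  unfold scanColB
  split
  · exact le_trans (by omega) (scanColB_ge g m (e + 1))
  · exact le_refl e
termination_by m - e
decreasing_by omega

def blocksB (g : List (List Char)) (m : Nat) (s : Nat) : List (Nat × Nat) :=
  if h : s < m then
    (s, scanColB g m s) :: blocksB g m (scanColB g m s + 1)
  else []
termination_by m - s
decreasing_by
  have := scanColB_ge g m s
  omega

-- int-value of grid column c read downwards, skipping spaces
def numB (g : List (List Char)) (c : Nat) : Int :=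
  (PySem.Int.ofChars? ((g.filter (fun row => row.getD c ' ' ≠ ' ')).map
      (fun row => row.getD c ' '))).getD 0

def preT (g : List (List Char)) (m : Nat) : Nat :=
  (List.range m).countP (fun c => g.all (fun r => r.getD c ' ' == ' ')) +
  (if 0 < m ∧ ¬ g.all (fun r => r.getD (m - 1) ' ' == ' ') = true then 1 else 0)

theorem sepB_iff (g : List (List Char)) (c : Nat) :
    sepB g c = true ↔ PreSep g c := by
  simp [sepB, PreSep, List.all_eq_true]

theorem scanColB_le (g : List (List Char)) (m s : Nat) (h : s ≤ m) :
    scanColB g m s ≤ m := by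
  rw [scanColB]
  split
  · exact scanColB_le g m (s + 1) (by omega)
  · exact h
termination_by m - s
decreasing_by omega

theorem scanColB_not_sep (g : List (List Char)) (m s c : Nat)
    (hc : s ≤ c) (hlt : c < scanColB g m s) : sepB g c = false := by
  rw [scanColB] at hlt
  by_cases h : s < m ∧ ¬ sepB g s
  · rw [dif_pos h] at hlt
    by_cases hcs : c = s
    · subst hcs; simpa using h.2
    · exact scanColB_not_sep g m (s + 1) c (by omega) hlt
  · rw [dif_neg h] at hlt; omega
termination_by m - s
decreasing_by omega

theorem scanColB_stop (g : List (List Char)) (m s : Nat)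
    (h : scanColB g m s < m) : sepB g (scanColB g m s) = true := by
  by_cases hc : s < m ∧ ¬ sepB g s
  · have heq : scanColB g m s = scanColB g m (s + 1) := by rw [scanColB, dif_pos hc]
    rw [heq] at h ⊢
    exact scanColB_stop g m (s + 1) h
  · have heq : scanColB g m s = s := by rw [scanColB, dif_neg hc]
    rw [heq] at h ⊢
    have h1 := not_and.mp hc h
    simpa using h1
termination_by m - s
decreasing_by omega

-- A's inner row scan, on a row whose nonspace run (if entered) extends to e
theorem scanA_from (row : List Char) (m s e j : Nat) (hem : e ≤ m)
    (hstop : row.getD e ' ' = ' ')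
    (H : ∀ c, s ≤ c → c + 1 < e → row.getD c ' ' ≠ ' ' → row.getD (c + 1) ' ' ≠ ' ')
    (hsj : s ≤ j) (hje : j ≤ e) :
    scanA row m j = if row.getD j ' ' = ' ' then j else e := by
  by_cases hsp : row.getD j ' ' = ' '
  · rw [scanA, dif_neg (fun hcon => hcon.2 hsp), if_pos hsp]
  · have hje' : j < e := by
      rcases Nat.eq_or_lt_of_le hje with h | h
      · exact absurd (h ▸ hstop) hsp
      · exact h
    rw [scanA, dif_pos ⟨by omega, hsp⟩, if_neg hsp]
    by_cases h2 : j + 1 = e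
    · rw [h2, scanA, dif_neg (fun hcon => hcon.2 hstop)]
    · have hns : row.getD (j + 1) ' ' ≠ ' ' := H j hsj (by omega) hsp
      have := scanA_from row m s e (j + 1) hem hstop H (by omega) (by omega)
      rw [if_neg hns] at this
      exact this
termination_by e - j
decreasing_by omega

theorem foldl_scan_stay (rows : List (List Char)) (m e : Nat)
    (h : ∀ row ∈ rows, row.getD e ' ' = ' ') :
    rows.foldl (fun acc row => scanA row m acc) e = e := by
  induction rows with
  | nil => rfl
  | cons r rest ih =>
    have h1 : scanA r m e = e := by
      rw [scanA, dif_neg (fun hcon => hcon.2 (h r (by simp)))]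
    simp only [List.foldl_cons, h1]
    exact ih (fun row hr => h row (by simp [hr]))

theorem foldl_scan_from (g : List (List Char)) (m s e : Nat)
    (hstopAll : ∀ r ∈ g, r.getD e ' ' = ' ')
    (HAll : ∀ r ∈ g, ∀ c, s ≤ c → c + 1 < e → r.getD c ' ' ≠ ' ' → r.getD (c + 1) ' ' ≠ ' ')
    (hem : e ≤ m) (hse : s ≤ e) :
    ∀ rows : List (List Char), (∀ r ∈ rows, r ∈ g) →
      rows.foldl (fun acc row => scanA row m acc) s =
        if ∀ r ∈ rows, r.getD s ' ' = ' ' then s else e := by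
  intro rows hsub
  induction rows with
  | nil => simp
  | cons r rest ih =>
    have hrg : r ∈ g := hsub r (by simp)
    have h1 : scanA r m s = if r.getD s ' ' = ' ' then s else e :=
      scanA_from r m s e s hem (hstopAll r hrg) (HAll r hrg) le_rfl hse
    by_cases hsp : r.getD s ' ' = ' '
    · rw [if_pos hsp] at h1
      simp only [List.foldl_cons, h1]
      rw [ih (fun x hx => hsub x (by simp [hx]))]
      by_cases hall : ∀ x ∈ rest, x.getD s ' ' = ' ' <;> simp_all
    · rw [if_neg hsp] at h1
      simp only [List.foldl_cons, h1]
      rw [foldl_scan_stay rest m e (fun x hx => hstopAll x (hsub x (by simp [hx])))]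
      rw [if_neg (fun hall => hsp (hall r (by simp)))]

-- under Pre_'s shape hypotheses A's shared-index pass lands exactly on the boundary
theorem scanRowsA_eq (g : List (List Char)) (m : Nat)
    (hlen : ∀ row ∈ g, row.length = m)
    (hshape : ∀ row ∈ g, ∀ c, c < m → 0 < c →
        row.getD (c - 1) ' ' ≠ ' ' → row.getD c ' ' = ' ' → PreSep g c)
    (s : Nat) (hsm : s ≤ m) :
    scanRowsA g m s = scanColB g m s := by
  set e := scanColB g m s with he
  have hse : s ≤ e := scanColB_ge g m s
  have hem : e ≤ m := scanColB_le g m s hsm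
  have hstopAll : ∀ r ∈ g, r.getD e ' ' = ' ' := by
    intro r hr
    rcases Nat.lt_or_ge e m with hlt | hge
    · exact (sepB_iff g e).mp (scanColB_stop g m s hlt) r hr
    · exact List.getD_eq_default r ' ' (by rw [hlen r hr]; omega)
  have HAll : ∀ r ∈ g, ∀ c, s ≤ c → c + 1 < e → r.getD c ' ' ≠ ' ' → r.getD (c + 1) ' ' ≠ ' ' := by
    intro r hr c hsc hlt hns hsp
    have hps : PreSep g (c + 1) := by
      refine hshape r hr (c + 1) (by omega) (by omega) ?_ hsp
      simpa using hns
    have h2 := (sepB_iff g (c + 1)).mpr hps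
    rw [scanColB_not_sep g m s (c + 1) (by omega) (by omega)] at h2
    exact absurd h2 (by simp)
  have := foldl_scan_from g m s e hstopAll HAll hem hse g (fun r hr => hr)
  rw [scanRowsA, this]
  by_cases hall : ∀ r ∈ g, r.getD s ' ' = ' '
  · rw [if_pos hall]
    have : scanColB g m s = s := by
      rw [scanColB, dif_neg (fun hc => hc.2 ((sepB_iff g s).mpr hall))]
    omega
  · rw [if_neg hall]

theorem loopA_eq (g : List (List Char)) (m : Nat)
    (hlen : ∀ row ∈ g, row.length = m)
    (hshape : ∀ row ∈ g, ∀ c, c < m → 0 < c →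
        row.getD (c - 1) ' ' ≠ ' ' → row.getD c ' ' = ' ' → PreSep g c)
    (s : Nat) (hsm : s ≤ m) :
    loopA g m s = (blocksB g m s).map
      (fun se => g.map (fun row => (row.drop se.1).take (se.2 - se.1))) := by
  by_cases h : s < m
  · rw [loopA, dif_pos h, blocksB, dif_pos h, List.map_cons]
    rw [scanRowsA_eq g m hlen hshape s hsm]
    have hse : s ≤ scanColB g m s := scanColB_ge g m s
    have hem : scanColB g m s ≤ m := scanColB_le g m s hsm
    congr 1
    rcases Nat.lt_or_ge (scanColB g m s) m with hlt | hge
    · exact loopA_eq g m hlen hshape (scanColB g m s + 1) (by omega)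
    · rw [loopA, dif_neg (by omega), blocksB, dif_neg (by omega)]
      rfl
  · rw [loopA, dif_neg h, blocksB, dif_neg h]
    rfl
termination_by m - s
decreasing_by omega

theorem blocksB_prop (g : List (List Char)) (m s : Nat) (hsm : s ≤ m) :
    ∀ se ∈ blocksB g m s, se.1 ≤ se.2 ∧ se.2 ≤ m := by
  intro se hse
  rw [blocksB] at hse
  by_cases h : s < m
  · rw [dif_pos h] at hse
    rcases List.mem_cons.mp hse with heq | hmem
    · subst heq
      exact ⟨scanColB_ge g m s, scanColB_le g m s hsm⟩
    · rcases Nat.lt_or_ge (scanColB g m s) m with hlt | hge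
      · exact blocksB_prop g m (scanColB g m s + 1) (by omega) se hmem
      · rw [blocksB, dif_neg (by have := scanColB_ge g m s; omega)] at hmem
        simp at hmem
  · rw [dif_neg h] at hse
    simp at hse
termination_by m - s
decreasing_by
  have := scanColB_ge g m s
  omega

theorem blocksB_nil (g : List (List Char)) (m s : Nat) (h : m ≤ s) :
    blocksB g m s = [] := by
  rw [blocksB, dif_neg (by omega)]

theorem blocksB_length (g : List (List Char)) (m s : Nat) (hsm : s ≤ m) :
    (blocksB g m s).length =
      (List.range' s (m - s)).countP (fun c => sepB g c) +
      (if s < m ∧ sepB g (m - 1) = false then 1 else 0) := by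
  by_cases h : s < m
  · rw [blocksB, dif_pos h]
    set e := scanColB g m s with he
    have hse : s ≤ e := scanColB_ge g m s
    have hem : e ≤ m := scanColB_le g m s hsm
    have hzero : (List.range' s (e - s)).countP (fun c => sepB g c) = 0 := by
      refine List.countP_eq_zero.mpr ?_
      intro c hc
      rw [List.mem_range'] at hc
      simp [scanColB_not_sep g m s c (by omega) (by omega)]
    have hsplit : List.range' s (m - s) = List.range' s (e - s) ++ List.range' e (m - e) := by
      have h1 : List.range' s (e - s) ++ List.range' (s + (e - s)) (m - e)
          = List.range' s (e - s + (m - e)) := List.range'_append_1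
      rw [show s + (e - s) = e by omega] at h1
      rw [show m - s = e - s + (m - e) by omega]
      exact h1.symm
    rcases Nat.lt_or_ge e m with hlt | hge
    · have hsepE : sepB g e = true := scanColB_stop g m s hlt
      have ih := blocksB_length g m (e + 1) (by omega)
      rw [show m - (e + 1) = m - e - 1 by omega] at ih
      rw [List.length_cons, hsplit, List.countP_append, hzero,
          show m - e = (m - e - 1) + 1 by omega, List.range'_succ, List.countP_cons]
      rw [ih]
      simp only [hsepE, if_pos]
      by_cases h2 : e + 1 < m
      · have hif : (if e + 1 < m ∧ sepB g (m - 1) = false then 1 else 0) =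
               (if s < m ∧ sepB g (m - 1) = false then 1 else 0) := by
          by_cases h3 : sepB g (m - 1) = false <;> simp [h2, h, h3]
        rw [hif]
        omega
      · have hm1 : sepB g (m - 1) = true := by rw [show m - 1 = e by omega]; exact hsepE
        rw [if_neg (by simp [h2] : ¬(e + 1 < m ∧ sepB g (m - 1) = false)),
            if_neg (by simp [hm1] : ¬(s < m ∧ sepB g (m - 1) = false))]
        omega
    · rw [blocksB_nil g m (e + 1) (by omega)]
      have hnsep : sepB g (m - 1) = false :=
        scanColB_not_sep g m s (m - 1) (by omega) (by omega)
      rw [hsplit, List.countP_append, hzero, show m - e = 0 by omega]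
      simp [hnsep, h]
  · rw [blocksB_nil g m s (by omega)]
    simp [show m - s = 0 by omega, show ¬ s < m from h]
termination_by m - s
decreasing_by
  have := scanColB_ge g m s
  omega

theorem preT_eq (g : List (List Char)) (m : Nat) :
    preT g m = (blocksB g m 0).length := by
  rw [blocksB_length g m 0 (Nat.zero_le m), preT, Nat.sub_zero, List.range_eq_range']
  congr 1
  rw [show (g.all fun r => r.getD (m - 1) ' ' == ' ') = sepB g (m - 1) from rfl]
  by_cases hm : 0 < m
  · by_cases hp : sepB g (m - 1) = true <;> simp [hp, hm]
  · simp [hm]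

theorem slice_getD (row : List Char) (s e k : Nat) (hrow : e ≤ row.length)
    (hk : k < e - s) :
    ((row.drop s).take (e - s)).getD k ' ' = row.getD (s + k) ' ' := by
  have h1 : s + k < row.length := by omega
  rw [List.getD_eq_getElem?_getD, List.getD_eq_getElem?_getD,
      List.getElem?_take_of_lt hk, List.getElem?_drop]

theorem numA_eq (g : List (List Char)) (m s e k : Nat)
    (hlen : ∀ row ∈ g, row.length = m)
    (hem : e ≤ m) (hk : k < e - s) :
    numA (g.map (fun row => (row.drop s).take (e - s))) k = numB g (s + k) := by
  unfold numA numB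
  have key : ∀ row ∈ g, ((row.drop s).take (e - s)).getD k ' ' = row.getD (s + k) ' ' := by
    intro row hr
    exact slice_getD row s e k (by rw [hlen row hr]; omega) hk
  rw [List.filter_map, List.map_map]
  refine congrArg (fun o => Option.getD o 0) (congrArg PySem.Int.ofChars? ?_)
  have hfil : (g.filter ((fun nb => decide (nb.getD k ' ' ≠ ' ')) ∘
        (fun row => (row.drop s).take (e - s)))) =
      g.filter (fun row => decide (row.getD (s + k) ' ' ≠ ' ')) := by
    refine List.filter_congr ?_
    intro row hr
    simp only [Function.comp_apply, key row hr]
  rw [hfil]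
  refine List.map_congr_left ?_
  intro row hr
  simp only [Function.comp_apply]
  exact key row (List.mem_of_mem_filter hr)

theorem numsA_eq (g : List (List Char)) (m s e : Nat) (r0 : List Char) (g' : List (List Char))
    (hg : g = r0 :: g')
    (hlen : ∀ row ∈ g, row.length = m)
    (hse : s ≤ e) (hem : e ≤ m) :
    (List.range ((g.map (fun row => (row.drop s).take (e - s))).headD []).length).map
        (fun k => numA (g.map (fun row => (row.drop s).take (e - s))) k) =
      (List.range' s (e - s)).map (fun c => numB g c) := by
  have hr0 : r0.length = m := hlen r0 (by rw [hg]; simp)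
  have hw : ((g.map (fun row => (row.drop s).take (e - s))).headD []).length = e - s := by
    rw [hg]
    simp only [List.map_cons, List.headD_cons, List.length_take, List.length_drop, hr0]
    omega
  rw [hw, List.range'_eq_map_range, List.map_map]
  refine List.map_congr_left ?_
  intro k hk
  rw [List.mem_range] at hk
  exact numA_eq g m s e k hlen hem hk

-- the paired fold: A's enumerate + operations-index loop as a fold over blocks zipped with ops
theorem fold_pair (g : List (List Char)) (m : Nat) (r0 : List Char) (g' : List (List Char))
    (hg : g = r0 :: g')
    (hlen : ∀ row ∈ g, row.length = m)
    (ops : List (List Char)) :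
    ∀ (bl : List (Nat × Nat)), (∀ se ∈ bl, se.1 ≤ se.2 ∧ se.2 ≤ m) →
    ∀ (i0 : Nat), i0 + bl.length ≤ ops.length → ∀ (acc : Int),
    ((PySem.List.enumerate (bl.map
          (fun se => g.map (fun row => (row.drop se.1).take (se.2 - se.1)))) (i0 : Int)).map
        (fun p => ((List.range (p.2.headD []).length).map (fun k => numA p.2 k),
                   PySem.List.pyGetD ops p.1 []))).foldl
        (fun res pr => if pr.2 = ['+'] then res + pr.1.sum else res + pr.1.foldl (· * ·) 1) acc
      = (bl.zip (ops.drop i0)).foldl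
        (fun tot pr =>
          tot + (if pr.2 = ['+']
                 then ((List.range' pr.1.1 (pr.1.2 - pr.1.1)).map (fun c => numB g c)).sum
                 else ((List.range' pr.1.1 (pr.1.2 - pr.1.1)).map (fun c => numB g c)).prod)) acc := by
  intro bl
  induction bl with
  | nil => intro _ i0 _ acc; simp [PySem.List.enumerate_nil]
  | cons se rest ih =>
    intro hbl i0 hops acc
    have hse := (hbl se (by simp)).1
    have hsem := (hbl se (by simp)).2
    have hi0 : i0 < ops.length := by simp at hops; omega
    rw [List.map_cons, PySem.List.enumerate_cons, List.map_cons, List.foldl_cons]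
    rw [List.drop_eq_getElem_cons hi0, List.zip_cons_cons, List.foldl_cons]
    have hop : PySem.List.pyGetD ops (i0 : Int) [] = ops[i0] := by
      rw [PySem.List.pyGetD_natCast]
      exact List.getD_eq_getElem ops [] hi0
    have hnums := numsA_eq g m se.1 se.2 r0 g' hg hlen hse hsem
    have hacc : (if ops[i0] = ['+']
          then acc + ((List.range' se.1 (se.2 - se.1)).map (fun c => numB g c)).sum
          else acc + ((List.range' se.1 (se.2 - se.1)).map (fun c => numB g c)).foldl (· * ·) 1)
        = acc + (if ops[i0] = ['+']
          then ((List.range' se.1 (se.2 - se.1)).map (fun c => numB g c)).sum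
          else ((List.range' se.1 (se.2 - se.1)).map (fun c => numB g c)).prod) := by
      by_cases h : ops[i0] = ['+']
      · simp [h]
      · simp [h, List.prod_eq_foldl]
    simp only [hop, hnums]
    rw [hacc]
    have : ((i0 : Int) + 1) = ((i0 + 1 : Nat) : Int) := by push_cast; ring
    rw [this]
    exact ih (fun x hx => hbl x (by simp [hx])) (i0 + 1) (by simp at hops ⊢; omega) _

-- B-side: the column chars are empty iff the column is a separator
theorem chars_nil_iff (g : List (List Char)) (c : Nat) :
    ((g.filter (fun row => row.getD c ' ' ≠ ' ')).map (fun row => row.getD c ' ')) = []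
      ↔ sepB g c = true := by
  rw [List.map_eq_nil_iff, List.filter_eq_nil_iff, sepB, List.all_eq_true]
  constructor
  · intro h r hr
    have := h r hr
    simpa using this
  · intro h r hr
    have := h r hr
    simpa using this

-- B's stream across a run of non-separator columns just accumulates sum and product
theorem stream_run (g ops : List (List Char)) (s k : Nat)
    (h : ∀ c, s ≤ c → c < s + k → sepB g c = false)
    (tot a b : Int) (pend : Bool) (i : Nat) :
    (List.range' s k).foldl (stepB g ops) (tot, a, b, pend, i)
      = (tot, a + ((List.range' s k).map (fun c => numB g c)).sum,
         b * ((List.range' s k).map (fun c => numB g c)).prod,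
         (if k = 0 then pend else true), i) := by
  induction k generalizing s a b pend with
  | zero => simp
  | succ k ih =>
    rw [List.range'_succ, List.foldl_cons]
    have hns : ¬ ((g.filter (fun row => row.getD s ' ' ≠ ' ')).map (fun row => row.getD s ' ')) = [] := by
      rw [chars_nil_iff, h s le_rfl (by omega)]
      simp
    have hstep : stepB g ops (tot, a, b, pend, i) s = (tot, a + numB g s, b * numB g s, true, i) := by
      simp only [stepB, if_neg hns]
      rfl
    rw [hstep, ih (s + 1) (fun c h1 h2 => h c (by omega) (by omega)) (a + numB g s) (b * numB g s) true]
    simp [add_assoc, mul_assoc]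

-- B's stream, started on a fresh block at s with running total tot and operator index i,
-- equals the fold over the remaining blocks zipped with the remaining operators
theorem stream_eq (g ops : List (List Char)) (m s : Nat) (hsm : s ≤ m) (tot : Int) (i : Nat)
    (hops : i + (blocksB g m s).length ≤ ops.length) :
    flushB ops ((List.range' s (m - s)).foldl (stepB g ops) (tot, 0, 1, false, i))
      = ((blocksB g m s).zip (ops.drop i)).foldl
          (fun t pr =>
            t + (if pr.2 = ['+']
                 then ((List.range' pr.1.1 (pr.1.2 - pr.1.1)).map (fun c => numB g c)).sum
                 else ((List.range' pr.1.1 (pr.1.2 - pr.1.1)).map (fun c => numB g c)).prod)) tot := by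
  by_cases h : s < m
  · rw [blocksB, dif_pos h] at hops ⊢
    set e := scanColB g m s with he
    have hse : s ≤ e := scanColB_ge g m s
    have hem : e ≤ m := scanColB_le g m s hsm
    have hi0 : i < ops.length := by simp at hops; omega
    have hop : PySem.List.pyGetD ops (i : Int) [] = ops[i] := by
      rw [PySem.List.pyGetD_natCast]
      exact List.getD_eq_getElem ops [] hi0
    have hsplit : List.range' s (m - s) = List.range' s (e - s) ++ List.range' e (m - e) := by
      have h1 : List.range' s (e - s) ++ List.range' (s + (e - s)) (m - e)
          = List.range' s (e - s + (m - e)) := List.range'_append_1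
      rw [show s + (e - s) = e by omega] at h1
      rw [show m - s = e - s + (m - e) by omega]
      exact h1.symm
    have hnons : ∀ c, s ≤ c → c < s + (e - s) → sepB g c = false := by
      intro c h1 h2
      exact scanColB_not_sep g m s c h1 (by omega)
    rw [hsplit, List.foldl_append,
        stream_run g ops s (e - s) hnons tot 0 1 false i]
    rw [List.drop_eq_getElem_cons hi0, List.zip_cons_cons, List.foldl_cons]
    rcases Nat.lt_or_ge e m with hlt | hge
    · -- separator column e closes the block, then recurse
      have hsepE : sepB g e = true := scanColB_stop g m s hlt
      have hchars : ((g.filter (fun row => row.getD e ' ' ≠ ' ')).map (fun row => row.getD e ' ')) = [] :=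
        (chars_nil_iff g e).mpr hsepE
      rw [show m - e = (m - e - 1) + 1 by omega, List.range'_succ, List.foldl_cons]
      have hstep : stepB g ops
          (tot, 0 + ((List.range' s (e - s)).map (fun c => numB g c)).sum,
            1 * ((List.range' s (e - s)).map (fun c => numB g c)).prod,
            (if e - s = 0 then false else true), i) e
          = (tot + (if ops[i] = ['+']
                then ((List.range' s (e - s)).map (fun c => numB g c)).sum
                else ((List.range' s (e - s)).map (fun c => numB g c)).prod),
             0, 1, false, i + 1) := by
        simp only [stepB, if_pos hchars, hop, zero_add, one_mul]
      rw [hstep, show m - e - 1 = m - (e + 1) by omega]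
      have := stream_eq g ops m (e + 1) (by omega)
          (tot + (if ops[i] = ['+']
                then ((List.range' s (e - s)).map (fun c => numB g c)).sum
                else ((List.range' s (e - s)).map (fun c => numB g c)).prod))
          (i + 1) (by simp at hops ⊢; omega)
      exact this
    · -- e = m: the final block runs to the right edge; flush closes it
      have hkpos : e - s ≠ 0 := by omega
      rw [show m - e = 0 by omega]
      simp only [List.range'_zero, List.foldl_nil]
      have hpend : (if e - s = 0 then false else true) = true := by simp [hkpos]
      rw [blocksB_nil g m (e + 1) (by omega)]
      simp [flushB, hpend, hop]
  · rw [show m - s = 0 by omega, blocksB_nil g m s (by omega)]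
    simp [flushB]
termination_by m - s
decreasing_by
  have := scanColB_ge g m s
  omega

-- ===== VERDICT (by name: the statement is the Claim_ definition above) =====
theorem solve_spec : Claim_equal_solve := by
  unfold Claim_equal_solve
  intro lines _ hpre
  unfold Spec_solve
  unfold Pre_solve at hpre
  obtain ⟨h1, hm0 | hrest⟩ := hpre
  · -- empty first line: no columns on either side
    simp only [solve, solve_alt]
    rw [hm0, loopA, dif_neg (by omega)]
    simp [PySem.List.enumerate_nil, flushB]
  obtain ⟨hlines, hlenB, _hdigB, hshapeB, hops, _htokB⟩ := hrest
  simp only [solve, solve_alt]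
  have hlen : ∀ row ∈ (lines.map String.toList).dropLast,
      row.length = ((lines.map String.toList).headD []).length := by
    intro row hr
    have := List.all_eq_true.mp hlenB row hr
    simpa using this
  have hshape : ∀ row ∈ (lines.map String.toList).dropLast,
      ∀ c, c < ((lines.map String.toList).headD []).length → 0 < c →
        row.getD (c - 1) ' ' ≠ ' ' → row.getD c ' ' = ' ' →
        PreSep ((lines.map String.toList).dropLast) c := by
    intro row hr c hc h0 hns hsp
    have h1 := List.all_eq_true.mp (List.all_eq_true.mp hshapeB row hr) c (List.mem_range.mpr hc)
    simp only [Bool.or_eq_true] at h1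
    rcases h1 with (h4 | h5) | h6
    · simp at h4; omega
    · simp at h5
      rcases h5 with h5 | h5
      · exact absurd h5 hns
      · exact absurd hsp h5
    · intro r hrr
      have := List.all_eq_true.mp h6 r hrr
      simpa using this
  have hgne : (lines.map String.toList).dropLast ≠ [] := by
    intro hnil
    have h2 := congrArg List.length hnil
    simp at h2
    omega
  obtain ⟨r0, g', hg⟩ := List.exists_cons_of_ne_nil hgne
  rw [loopA_eq _ _ hlen hshape 0 (Nat.zero_le _)]
  have hops' : preT ((lines.map String.toList).dropLast)
      (((lines.map String.toList).headD []).length)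
      ≤ (PySem.Chars.split₀ ((lines.map String.toList).getLastD [])).length := hops
  rw [preT_eq] at hops'
  have key := fold_pair _ _ r0 g' hg hlen
      (PySem.Chars.split₀ ((lines.map String.toList).getLastD []))
      (blocksB _ _ 0) (blocksB_prop _ _ 0 (Nat.zero_le _)) 0
      (by simpa using hops') 0
  rw [List.drop_zero] at key
  rw [show ((0 : Nat) : Int) = (0 : Int) by norm_num] at key
  rw [key]
  have hs := stream_eq ((lines.map String.toList).dropLast)
      (PySem.Chars.split₀ ((lines.map String.toList).getLastD []))
      (((lines.map String.toList).headD []).length) 0 (Nat.zero_le _) 0 0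
      (by simpa using hops')
  rw [List.drop_zero] at hs
  rw [Nat.sub_zero, ← List.range_eq_range'] at hs
  exact hs.symm
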